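-- pv_equiv track=rewrite | github.com/NikolaDeja/pp1 | 04-Subroutines/mod_27.py | f
-- ===== SOURCE A (Python) =====
-- def f(card_number):
--     s=""
--     index=0
--     for i in card_number:
--         if index<=1 or index>=12:
--             s+=i
--         else:
--             s+="*"
--         index+=1
--     return s
-- ===== SOURCE B (Python) =====
-- def f(card_number):
--     return card_number[:2] + "*" * len(card_number[2:12]) + card_number[12:]
-- ===== Notes on version B (the rewrite author's own statement) =====
-- stated objective: idiomatic
-- what changed: Replaces the per-character loop with an index counter and branch by closed-form slice assembly: keep the first two characters, emit one star per character of the 2..11 slice, append the tail from index 12.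
import Mathlib
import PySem

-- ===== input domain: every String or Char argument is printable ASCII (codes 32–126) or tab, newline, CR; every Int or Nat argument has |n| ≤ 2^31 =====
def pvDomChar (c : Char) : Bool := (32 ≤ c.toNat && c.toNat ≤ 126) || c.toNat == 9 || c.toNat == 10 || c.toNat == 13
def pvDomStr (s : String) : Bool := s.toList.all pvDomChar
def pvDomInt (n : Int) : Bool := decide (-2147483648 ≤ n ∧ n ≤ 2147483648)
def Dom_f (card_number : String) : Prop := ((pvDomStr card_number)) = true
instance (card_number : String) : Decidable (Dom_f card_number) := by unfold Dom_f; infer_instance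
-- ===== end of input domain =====

-- B replaces A's per-character loop with closed-form slice assembly (same cost, more idiomatic).

-- ===== PORT A =====
-- for i in card_number: build s char by char, masking positions 2..11; index counter is an Int.
def f (card_number : String) : String :=
  let r := card_number.toList.foldl
    (fun (st : List Char × Int) i =>
      if st.2 ≤ 1 ∨ st.2 ≥ 12 then (st.1 ++ [i], st.2 + 1) else (st.1 ++ ['*'], st.2 + 1))
    ([], 0)
  String.ofList r.1

-- ===== PORT B =====
-- card_number[:2] + '*' * len(card_number[2:12]) + card_number[12:]
def f_alt (card_number : String) : String :=
  let cs := card_number.toList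
  String.ofList (PySem.List.slice cs none (some 2)
    ++ List.replicate (PySem.List.slice cs (some 2) (some 12)).length '*'
    ++ PySem.List.slice cs (some 12) none)

-- ===== PRECONDITION & SPEC =====
def Spec_f (card_number : String) (out : String) : Prop := out = f_alt card_number
instance (card_number : String) (out : String) : Decidable (Spec_f card_number out) := by unfold Spec_f; infer_instance

-- ===== CLAIM (what is proved, stated in full; the proofs are below) =====
def Claim_equal_f : Prop := ∀ (card_number : String), Dom_f card_number → Spec_f card_number (f card_number)

-- ===== LEMMAS AND PROOFS =====

-- Closed form of A's loop body as structural recursion on the remaining characters.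
def pvMask : List Char → Int → List Char
  | [], _ => []
  | c :: t, k => (if k ≤ 1 ∨ k ≥ 12 then c else '*') :: pvMask t (k + 1)

theorem pvFold_eq (cs : List Char) (acc : List Char) (k : Int) :
    (cs.foldl
      (fun (st : List Char × Int) i =>
        if st.2 ≤ 1 ∨ st.2 ≥ 12 then (st.1 ++ [i], st.2 + 1) else (st.1 ++ ['*'], st.2 + 1))
      (acc, k)).1 = acc ++ pvMask cs k := by
  induction cs generalizing acc k with
  | nil => simp [pvMask]
  | cons c t ih =>
    simp only [List.foldl_cons, pvMask]
    by_cases h : k ≤ 1 ∨ k ≥ 12 <;> simp [h, ih]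

theorem pvMask_ge (cs : List Char) (k : Int) (h : 12 ≤ k) : pvMask cs k = cs := by
  induction cs generalizing k with
  | nil => rfl
  | cons c t ih =>
    simp only [pvMask]
    rw [if_pos (Or.inr h), ih (k + 1) (by omega)]

theorem pvMask_mid (j : Nat) (hj : j ≤ 10) (cs : List Char) :
    pvMask cs (12 - (j : Int)) = List.replicate (min j cs.length) '*' ++ cs.drop j := by
  induction j generalizing cs with
  | zero => simpa using pvMask_ge cs 12 (le_refl _)
  | succ n ih =>
    cases cs with
    | nil => simp [pvMask]
    | cons c t =>
      simp only [pvMask]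
      rw [if_neg (by omega)]
      have : (12 : Int) - (n + 1 : Nat) + 1 = 12 - (n : Int) := by push_cast; ring
      rw [this, ih (by omega) t]
      simp only [List.length_cons, List.drop_succ_cons]
      have : min (n + 1) (t.length + 1) = min n t.length + 1 := by omega
      rw [this, List.replicate_succ]
      rfl

theorem pvMask_zero (cs : List Char) :
    pvMask cs 0 = cs.take 2 ++ List.replicate (min 10 (cs.drop 2).length) '*' ++ cs.drop 12 := by
  match cs with
  | [] => rfl
  | [a] => rfl
  | a :: b :: t =>
    simp only [pvMask]
    rw [if_pos (by omega), if_pos (by omega)]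
    have h := pvMask_mid 10 (le_refl _) t
    norm_num at h
    norm_num
    exact h

-- ===== VERDICT (by name: the statement is the Claim_ definition above) =====
theorem f_spec : Claim_equal_f := by
  intro card_number _
  unfold Spec_f f f_alt
  simp only [pvFold_eq, List.nil_append]
  rw [pvMask_zero]
  congr 1
  have h2 : PySem.List.slice card_number.toList none (some 2) = card_number.toList.take 2 := by
    simpa using PySem.List.slice_to_natCast card_number.toList 2
  have h212 : PySem.List.slice card_number.toList (some 2) (some 12)
      = (card_number.toList.drop 2).take 10 := by
    simpa using PySem.List.slice_natCast card_number.toList 2 12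
  have h12 : PySem.List.slice card_number.toList (some 12) none = card_number.toList.drop 12 := by
    simpa using PySem.List.slice_from_natCast card_number.toList 12
  rw [h2, h212, h12]
  simp [List.length_take]
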